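-- pv_equiv track=rewrite | github.com/PhilippGrivskiy/Python-homework | Lesson3/3.5.py | sum_calc
-- ===== SOURCE A (Python) =====
-- def sum_calc(input_string):
--     input_list = input_string.split()
--     my_sum = 0
--     for el in input_list:
--         if el:
--             try:
--                 if el == "N":
--                     return my_sum, False
--                 else:
--                     my_sum += int(el)
--             except ValueError:
--                 continue
--     return my_sum, True
-- ===== SOURCE B (Python) =====
-- def sum_calc(input_string):
--     tokens = input_string.split()
--     try:
--         boundary = tokens.index("N")
--         stopped = True
--     except ValueError:
--         boundary = len(tokens)
--         stopped = False
--     total = 0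
--     for el in tokens[:boundary]:
--         try:
--             total += int(el)
--         except ValueError:
--             pass
--     return total, not stopped
-- ===== Notes on version B (the rewrite author's own statement) =====
-- stated objective: alternative
-- what changed: Replaces A's single early-return loop with a locate-boundary-then-sum structure: first find the first 'N' token (tokens.index), then sum the integer tokens in that prefix.
import Mathlib
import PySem

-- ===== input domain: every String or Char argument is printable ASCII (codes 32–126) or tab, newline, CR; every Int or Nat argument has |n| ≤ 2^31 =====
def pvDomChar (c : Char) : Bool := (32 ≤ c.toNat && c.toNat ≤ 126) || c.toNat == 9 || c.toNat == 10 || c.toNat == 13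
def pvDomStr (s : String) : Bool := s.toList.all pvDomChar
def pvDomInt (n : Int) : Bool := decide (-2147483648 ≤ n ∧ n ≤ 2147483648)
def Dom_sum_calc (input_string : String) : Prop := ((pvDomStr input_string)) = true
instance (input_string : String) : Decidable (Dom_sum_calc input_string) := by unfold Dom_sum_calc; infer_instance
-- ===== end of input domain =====

-- B replaces A's single early-return loop with locate-the-first-"N"-boundary, then sum the prefix (alternative decomposition).

-- ===== PORT A =====
-- A's for-loop with early return on "N": structural recursion over the token list carrying my_sum.
def sumCalcLoopA : List String → Int → Int × Bool
  | [], my_sum => (my_sum, true)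
  | el :: rest, my_sum =>
    if el ≠ "" then
      if el = "N" then (my_sum, false)
      else
        match PySem.Int.ofStr? el with
        | some v => sumCalcLoopA rest (my_sum + v)   -- my_sum += int(el)
        | none => sumCalcLoopA rest my_sum           -- ValueError: continue
    else sumCalcLoopA rest my_sum

def sum_calc (input_string : String) : Int × Bool :=
  sumCalcLoopA (PySem.Str.split₀ input_string) 0

-- ===== PORT B =====
-- sum of the integer tokens in a prefix (try int(el) / except pass)
def sumCalcPrefixSum (prefix_ : List String) : Int :=
  prefix_.foldl (fun total el => match PySem.Int.ofStr? el with
    | some v => total + v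
    | none => total) 0

def sum_calc_alt (input_string : String) : Int × Bool :=
  let tokens := PySem.Str.split₀ input_string
  match PySem.List.index? tokens "N" with
  | some boundary => (sumCalcPrefixSum (tokens.take boundary), false)
  | none => (sumCalcPrefixSum tokens, true)

-- ===== PRECONDITION & SPEC =====
def Spec_sum_calc (input_string : String) (out : Int × Bool) : Prop := out = sum_calc_alt input_string
instance (input_string : String) (out : Int × Bool) : Decidable (Spec_sum_calc input_string out) := by unfold Spec_sum_calc; infer_instance

-- ===== CLAIM (what is proved, stated in full; the proofs are below) =====
def Claim_equal_sum_calc : Prop := ∀ (input_string : String), Dom_sum_calc input_string → Spec_sum_calc input_string (sum_calc input_string)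

-- ===== LEMMAS AND PROOFS =====

theorem sumCalcFoldShift (ts : List String) : ∀ (a : Int),
    ts.foldl (fun total el => match PySem.Int.ofStr? el with
      | some v => total + v | none => total) a
    = a + ts.foldl (fun total el => match PySem.Int.ofStr? el with
      | some v => total + v | none => total) 0 := by
  induction ts with
  | nil => intro a; simp
  | cons x xs ih =>
    intro a
    rw [List.foldl_cons, List.foldl_cons]
    cases PySem.Int.ofStr? x with
    | none => exact ih a
    | some v => rw [ih (a + v), ih (0 + v)]; ring

theorem sumCalcPrefixSum_cons (el : String) (ts : List String) :
    sumCalcPrefixSum (el :: ts) =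
      (match PySem.Int.ofStr? el with | some v => v | none => 0) + sumCalcPrefixSum ts := by
  unfold sumCalcPrefixSum
  rw [List.foldl_cons, sumCalcFoldShift]
  cases PySem.Int.ofStr? el <;> simp

theorem sumCalcLoopA_eq (ts : List String) : ∀ (s : Int),
    sumCalcLoopA ts s =
      (match PySem.List.index? ts "N" with
        | some b => (s + sumCalcPrefixSum (ts.take b), false)
        | none => (s + sumCalcPrefixSum ts, true)) := by
  induction ts with
  | nil => intro s; simp [sumCalcLoopA, PySem.List.index?, sumCalcPrefixSum]
  | cons el rest ih =>
    intro s
    by_cases hN : el = "N"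
    · subst hN
      rw [PySem.List.index?_cons_self]
      simp [sumCalcLoopA, sumCalcPrefixSum]
    · rw [PySem.List.index?_cons_of_ne rest hN]
      have key : ∀ s', s' = s + (match PySem.Int.ofStr? el with | some v => v | none => 0) →
          sumCalcLoopA rest s' =
            (match Option.map (fun x => x + 1) (PySem.List.index? rest "N") with
              | some b => (s + sumCalcPrefixSum ((el :: rest).take b), false)
              | none => (s + sumCalcPrefixSum (el :: rest), true)) := by
        intro s' hs'
        rw [ih]
        cases PySem.List.index? rest "N" <;>
          simp [hs', sumCalcPrefixSum_cons] <;> ring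
      by_cases hE : el = ""
      · subst hE
        have h0 : PySem.Int.ofStr? "" = none := by decide
        simp only [sumCalcLoopA]
        exact key s (by rw [h0]; ring)
      · simp only [sumCalcLoopA, if_pos hE, if_neg hN]
        cases hel : PySem.Int.ofStr? el
        · exact key s (by rw [hel]; ring)
        · exact key _ (by rw [hel])

-- ===== VERDICT (by name: the statement is the Claim_ definition above) =====
theorem sum_calc_spec : Claim_equal_sum_calc := by
  intro input_string _
  unfold Spec_sum_calc sum_calc sum_calc_alt
  rw [sumCalcLoopA_eq]
  cases h : PySem.List.index? (PySem.Str.split₀ input_string) "N" <;> simp only [h, zero_add]
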